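-- pv_equiv track=rewrite | github.com/ChristopherJohannesKoen/AH_CODE_ATENTA_2025 | Code/Hackathon-2025/src/backend/Model/AudToSpeach/V2/universal_convo_to_json-1.1.2.py | build_role_map
-- ===== SOURCE A (Python) =====
-- from typing import List, Dict, Any, Optional, Tuple
--
-- def build_role_map(speaker_labels: List[str], user_map: Optional[Dict[str, str]] = None) -> Dict[str, str]:
--     role_map = {}
--     for i, spk in enumerate(sorted(set(speaker_labels))):
--         if user_map and spk in user_map:
--             role_map[spk] = user_map[spk]
--         else:
--             role_map[spk] = f"Speaker {i+1}"
--     return role_map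
-- ===== SOURCE B (Python) =====
-- def build_role_map(speaker_labels, user_map=None):
--     # Selection-by-minimum: repeatedly extract the smallest remaining speaker
--     # instead of sorting once and enumerating.
--     remaining = set(speaker_labels)
--     role_map = {}
--     i = 0
--     while remaining:
--         spk = min(remaining)
--         remaining.remove(spk)
--         i += 1
--         if user_map and spk in user_map:
--             role_map[spk] = user_map[spk]
--         else:
--             role_map[spk] = f"Speaker {i}"
--     return role_map
-- ===== Notes on version B (the rewrite author's own statement) =====
-- stated objective: alternative
-- what changed: B replaces sort-then-enumerate with selection-by-minimum: a while loop that repeatedly extracts min(remaining) from the speaker set and assigns it the next index (or the user override), so no sorted() or enumerate() is used.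
import Mathlib
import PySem

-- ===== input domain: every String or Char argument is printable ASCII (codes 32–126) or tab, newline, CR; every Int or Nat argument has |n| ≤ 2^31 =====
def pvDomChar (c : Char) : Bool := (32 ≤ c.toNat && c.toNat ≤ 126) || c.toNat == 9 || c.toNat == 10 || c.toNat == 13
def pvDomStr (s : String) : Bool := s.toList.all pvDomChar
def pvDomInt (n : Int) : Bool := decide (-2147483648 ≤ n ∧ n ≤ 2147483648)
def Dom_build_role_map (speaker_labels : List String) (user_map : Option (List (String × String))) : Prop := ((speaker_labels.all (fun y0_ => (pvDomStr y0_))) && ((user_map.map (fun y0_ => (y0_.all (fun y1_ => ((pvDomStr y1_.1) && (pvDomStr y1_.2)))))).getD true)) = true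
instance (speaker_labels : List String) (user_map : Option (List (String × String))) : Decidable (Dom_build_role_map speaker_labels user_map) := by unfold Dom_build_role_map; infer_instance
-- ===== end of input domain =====

-- B replaces sort-then-enumerate with selection-by-minimum (repeated min extraction); same result, a different algorithm.

-- ===== PORT A =====
def build_role_map (speaker_labels : List String) (user_map : Option (List (String × String))) : List (String × String) :=
  let umList := user_map.getD []
  let umD : PySem.Dict String String := PySem.Dict.ofList umList
  ((PySem.List.enumerate (PySem.List.sorted (PySem.Set.ofList speaker_labels) (fun x => x) false)).foldl
    (fun rm p =>
      if !umList.isEmpty && umD.contains p.2 then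
        rm.insert p.2 (umD.getD p.2 "")
      else
        rm.insert p.2 ("Speaker " ++ PySem.Int.toStr (p.1 + 1)))
    PySem.Dict.empty).items

-- ===== PORT B =====
-- the while loop of Source B: extract min(remaining), remove it (set.remove on a member
-- always succeeds, so the 'none' arm of remove? is unreachable), assign the name.
def selLoop (user_map : Option (List (String × String))) (remaining : List String) (i : Int)
    (rm : PySem.Dict String String) : PySem.Dict String String :=
  match hmin : PySem.List.min? remaining (fun x => x) with
  | none => rm
  | some spk =>
    let umList := user_map.getD []
    let umD : PySem.Dict String String := PySem.Dict.ofList umList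
    let rm' := if !umList.isEmpty && umD.contains spk then
        rm.insert spk (umD.getD spk "")
      else
        rm.insert spk ("Speaker " ++ PySem.Int.toStr (i + 1))
    match hrem : PySem.List.remove? remaining spk with
    | none => rm'
    | some r => selLoop user_map r (i + 1) rm'
termination_by remaining.length
decreasing_by
  have hmem : spk ∈ remaining := PySem.List.min?_mem hmin
  have := PySem.List.remove?_eq_some_erase remaining spk hmem
  rw [this] at hrem
  cases hrem
  have := List.length_erase_of_mem hmem
  have hpos : 0 < remaining.length := List.length_pos_of_mem hmem
  omega

def build_role_map_alt (speaker_labels : List String) (user_map : Option (List (String × String))) : List (String × String) :=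
  (selLoop user_map (PySem.Set.ofList speaker_labels) 0 PySem.Dict.empty).items

-- ===== PRECONDITION & SPEC =====
def Spec_build_role_map (speaker_labels : List String) (user_map : Option (List (String × String))) (out : List (String × String)) : Prop := out = build_role_map_alt speaker_labels user_map
instance (speaker_labels : List String) (user_map : Option (List (String × String))) (out : List (String × String)) : Decidable (Spec_build_role_map speaker_labels user_map out) := by unfold Spec_build_role_map; infer_instance

-- ===== CLAIM (what is proved, stated in full; the proofs are below) =====
def Claim_equal_build_role_map : Prop := ∀ (speaker_labels : List String) (user_map : Option (List (String × String))), Dom_build_role_map speaker_labels user_map → Spec_build_role_map speaker_labels user_map (build_role_map speaker_labels user_map)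

-- ===== LEMMAS AND PROOFS =====

-- on a duplicate-free list, sorted(l) is the minimum followed by sorted(l minus the minimum)
theorem pv_sorted_cons_min (l : List String) (m : String) (hnd : l.Nodup)
    (hmin : PySem.List.min? l (fun x => x) = some m) :
    PySem.List.sorted l (fun x => x) false = m :: PySem.List.sorted (l.erase m) (fun x => x) false := by
  have hmem : m ∈ l := PySem.List.min?_mem hmin
  apply PySem.List.sorted_eq_of_perm_of_pairwise_lt
  · exact ((PySem.List.sorted_perm (l.erase m) (fun x => x) false).cons m).trans
      (List.perm_cons_erase hmem).symm
  · rw [List.pairwise_cons]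
    constructor
    · intro y hy
      have hyE : y ∈ l.erase m := (PySem.List.mem_sorted _ _ _ _).mp hy
      have hyl : y ∈ l := List.mem_of_mem_erase hyE
      have hle : m ≤ y := PySem.List.min?_isMin hmin y hyl
      have hne : y ≠ m := ((List.Nodup.mem_erase_iff hnd).mp hyE).1
      exact lt_of_le_of_ne hle (Ne.symm hne)
    · have hle := PySem.List.sorted_pairwise (l.erase m) (fun x => x)
      have hndE : (PySem.List.sorted (l.erase m) (fun x => x) false).Nodup :=
        (PySem.List.sorted_perm (l.erase m) (fun x => x) false).nodup_iff.mpr (hnd.erase m)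
      exact (hle.and hndE).imp (fun h => lt_of_le_of_ne h.1 h.2)

-- the selection loop computes exactly A's enumerate-over-sorted fold
theorem pv_selLoop_eq (um : Option (List (String × String))) :
    ∀ (n : Nat) (l : List String), l.length ≤ n → l.Nodup → ∀ (i : Int) (rm : PySem.Dict String String),
      selLoop um l i rm =
        (PySem.List.enumerate (PySem.List.sorted l (fun x => x) false) i).foldl
          (fun rm p =>
            if !(um.getD []).isEmpty && (PySem.Dict.ofList (um.getD [])).contains p.2 then
              rm.insert p.2 ((PySem.Dict.ofList (um.getD [])).getD p.2 "")
            else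
              rm.insert p.2 ("Speaker " ++ PySem.Int.toStr (p.1 + 1))) rm := by
  intro n
  induction n with
  | zero =>
    intro l hlen _ i rm
    have : l = [] := List.eq_nil_of_length_eq_zero (Nat.le_zero.mp hlen)
    subst this
    rw [selLoop.eq_def]
    simp [PySem.List.min?, PySem.List.sorted]
  | succ n ih =>
    intro l hlen hnd i rm
    rw [selLoop.eq_def]
    split
    · rename_i hmin
      have : l = [] := (PySem.List.min?_eq_none_iff _ _).mp hmin
      subst this
      simp [PySem.List.sorted]
    · rename_i m hmin
      have hmem : m ∈ l := PySem.List.min?_mem hmin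
      split
      · rename_i hrem
        exact absurd hmem ((PySem.List.remove?_eq_none_iff _ _).mp hrem)
      · rename_i r hrem
        rw [PySem.List.remove?_eq_some_erase l m hmem] at hrem
        cases hrem
        have hlen' : (l.erase m).length ≤ n := by
          have h1 := List.length_erase_of_mem hmem
          have h2 := List.length_pos_of_mem hmem
          omega
        rw [ih (l.erase m) hlen' (hnd.erase m),
          pv_sorted_cons_min l m hnd hmin, PySem.List.enumerate_cons, List.foldl_cons]

theorem pv_a_eq_b (speaker_labels : List String) (user_map : Option (List (String × String))) :
    build_role_map speaker_labels user_map = build_role_map_alt speaker_labels user_map := by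
  unfold build_role_map build_role_map_alt
  rw [pv_selLoop_eq user_map (PySem.Set.ofList speaker_labels).length
    (PySem.Set.ofList speaker_labels) (le_refl _) (PySem.Set.nodup_ofList _) 0 PySem.Dict.empty]

-- ===== VERDICT (by name: the statement is the Claim_ definition above) =====
theorem build_role_map_spec : Claim_equal_build_role_map := by
  intro speaker_labels user_map _
  unfold Spec_build_role_map
  exact pv_a_eq_b speaker_labels user_map
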